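-- pv_equiv track=rewrite | github.com/madhur02/Data-Dumping | LDA_Sklearn_Rake_Vizualization (1).py | remove_redundant_word_phrases
-- ===== SOURCE A (Python) =====
-- from collections import Counter
--
-- def remove_redundant_word_phrases(phrase_list):
--
--     '''
--     @Input list of phrases.
--     Remove the phrase if more than 2 words are repeting in the same phrase.
--     '''
--     clean_phrases=[]
--
--     for phrase in phrase_list:
--         word_list = phrase.split()
--         counts = dict(Counter(word_list)).values()
--         tmp = [count for count in counts if count>1]
--         if not tmp:
--             clean_phrases.append(phrase)
--     return clean_phrases
-- ===== SOURCE B (Python) =====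
-- def _all_words_distinct(phrase):
--     words = sorted(phrase.split())
--     return all(a != b for a, b in zip(words, words[1:]))
--
-- def remove_redundant_word_phrases(phrase_list):
--     return [phrase for phrase in phrase_list if _all_words_distinct(phrase)]
-- ===== Notes on version B (the rewrite author's own statement) =====
-- stated objective: alternative
-- what changed: Detects repeated words by sorting each phrase's word list and scanning adjacent pairs for equality, instead of building a Counter frequency table and filtering its counts list; the result is a filtering comprehension with no hash table.
import Mathlib
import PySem

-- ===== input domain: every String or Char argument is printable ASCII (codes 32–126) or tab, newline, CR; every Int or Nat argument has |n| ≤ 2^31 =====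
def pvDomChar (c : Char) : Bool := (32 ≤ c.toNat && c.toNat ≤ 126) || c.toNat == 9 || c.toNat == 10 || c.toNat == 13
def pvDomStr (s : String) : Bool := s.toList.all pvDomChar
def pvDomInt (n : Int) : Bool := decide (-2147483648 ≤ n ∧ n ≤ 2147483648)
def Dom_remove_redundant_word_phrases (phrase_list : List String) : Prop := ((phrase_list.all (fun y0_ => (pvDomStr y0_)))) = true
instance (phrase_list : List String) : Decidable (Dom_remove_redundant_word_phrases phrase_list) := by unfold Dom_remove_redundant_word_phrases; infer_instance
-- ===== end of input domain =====

-- B detects repeated words by sorting each phrase's word list and scanning adjacent pairs,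
-- instead of A's Counter frequency table with a filtered counts list — a comparison-based
-- alternative with no hash structure.

-- ===== PORT A =====
def remove_redundant_word_phrases (phrase_list : List String) : List String :=
  phrase_list.foldl (fun clean_phrases phrase =>
    let word_list := PySem.Str.split₀ phrase
    let counts := (PySem.Dict.counter word_list).values
    let tmp := counts.filter (fun count => count > 1)
    if tmp = [] then clean_phrases ++ [phrase] else clean_phrases) []

-- ===== PORT B =====
def pvAllWordsDistinct (phrase : String) : Bool :=
  let words := PySem.List.sorted (PySem.Str.split₀ phrase) (fun x => x) false
  (words.zip words.tail).all (fun p => p.1 != p.2)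

def remove_redundant_word_phrases_alt (phrase_list : List String) : List String :=
  phrase_list.filter pvAllWordsDistinct

-- ===== PRECONDITION & SPEC =====
def Spec_remove_redundant_word_phrases (phrase_list : List String) (out : List String) : Prop := out = remove_redundant_word_phrases_alt phrase_list
instance (phrase_list : List String) (out : List String) : Decidable (Spec_remove_redundant_word_phrases phrase_list out) := by unfold Spec_remove_redundant_word_phrases; infer_instance

-- ===== CLAIM (what is proved, stated in full; the proofs are below) =====
def Claim_equal_remove_redundant_word_phrases : Prop := ∀ (phrase_list : List String), Dom_remove_redundant_word_phrases phrase_list → Spec_remove_redundant_word_phrases phrase_list (remove_redundant_word_phrases phrase_list)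

-- ===== LEMMAS AND PROOFS =====

-- A's test: the filtered counts list is empty iff the word list has no duplicates.
theorem pv_counterFilter_iff (ws : List String) :
    (((PySem.Dict.counter ws).values.filter (fun count => count > 1)) = []) ↔ ws.Nodup := by
  have hv : (PySem.Dict.counter ws).values
      = (PySem.Set.ofList ws).map (fun k => (ws.count k : Int)) := by
    show ((PySem.Dict.counter ws).items.map Prod.snd) = _
    rw [PySem.Dict.items_counter]
    simp
  rw [hv, List.filter_eq_nil_iff]
  simp only [List.nodup_iff_count_le_one, List.mem_map, decide_eq_true_eq, not_lt]
  constructor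
  · intro h a
    by_cases hmem : a ∈ ws
    · have := h ((ws.count a : Int)) ⟨a, by simpa [PySem.Set.mem_ofList] using hmem, rfl⟩
      exact_mod_cast this
    · simp [List.count_eq_zero_of_not_mem hmem]
  · rintro h c ⟨a, _, rfl⟩
    exact_mod_cast h a

-- In a ≤-sorted list, all adjacent pairs distinct iff the list has no duplicates.
theorem pv_adj_iff_nodup (l : List String) (hs : l.Pairwise (· ≤ ·)) :
    ((l.zip l.tail).all (fun p => p.1 != p.2) = true) ↔ l.Nodup := by
  induction l with
  | nil => simp
  | cons a t ih =>
    cases t with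
    | nil => simp
    | cons b u =>
      have hs' : (b :: u).Pairwise (· ≤ ·) := hs.tail
      have hab : a ≤ b := (List.pairwise_cons.mp hs).1 b (by simp)
      have hzip : ((a :: b :: u).zip (a :: b :: u).tail).all (fun p => p.1 != p.2)
          = ((a != b) && ((b :: u).zip (b :: u).tail).all (fun p => p.1 != p.2)) := by
        simp [List.zip]
      rw [hzip]
      simp only [Bool.and_eq_true, bne_iff_ne, ih hs', List.nodup_cons]
      constructor
      · rintro ⟨hne, hnd⟩
        refine ⟨?_, hnd⟩
        intro hmem
        have hlt : a < b := lt_of_le_of_ne hab hne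
        rcases List.mem_cons.mp hmem with rfl | hu
        · exact hne rfl
        · exact absurd ((List.pairwise_cons.mp hs').1 a hu) (not_le.mpr hlt)
      · rintro ⟨hnm, hnd⟩
        exact ⟨fun hEq => hnm (hEq ▸ by simp), hnd⟩

-- B's predicate holds iff the word list has no duplicates.
theorem pv_allDistinct_iff (phrase : String) :
    pvAllWordsDistinct phrase = true ↔ (PySem.Str.split₀ phrase).Nodup := by
  unfold pvAllWordsDistinct
  have hperm : (PySem.List.sorted (PySem.Str.split₀ phrase) (fun x => x) false).Perm
      (PySem.Str.split₀ phrase) := PySem.List.sorted_perm _ _ _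
  rw [pv_adj_iff_nodup _ (by simpa using PySem.List.sorted_pairwise (PySem.Str.split₀ phrase) (fun x => x))]
  exact hperm.nodup_iff

theorem pv_foldl_eq_filter (xs : List String) (acc : List String) :
    (xs.foldl (fun clean_phrases phrase =>
      let word_list := PySem.Str.split₀ phrase
      let counts := (PySem.Dict.counter word_list).values
      let tmp := counts.filter (fun count => count > 1)
      if tmp = [] then clean_phrases ++ [phrase] else clean_phrases) acc)
      = acc ++ xs.filter pvAllWordsDistinct := by
  induction xs generalizing acc with
  | nil => simp
  | cons x xs ih =>
    simp only [List.foldl_cons, List.filter_cons]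
    by_cases h : ((PySem.Dict.counter (PySem.Str.split₀ x)).values.filter (fun count => count > 1)) = []
    · have hb : pvAllWordsDistinct x = true :=
        (pv_allDistinct_iff x).mpr ((pv_counterFilter_iff _).mp h)
      simp only [h, if_pos, hb, ih]
      simp
    · have hb : pvAllWordsDistinct x = false := by
        cases hb' : pvAllWordsDistinct x
        · rfl
        · exact absurd ((pv_counterFilter_iff _).mpr ((pv_allDistinct_iff x).mp hb')) h
      simp only [if_neg h, hb, ih]
      simp

-- ===== VERDICT (by name: the statement is the Claim_ definition above) =====
theorem remove_redundant_word_phrases_spec : Claim_equal_remove_redundant_word_phrases := by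
  intro phrase_list _
  unfold Spec_remove_redundant_word_phrases remove_redundant_word_phrases remove_redundant_word_phrases_alt
  simpa using pv_foldl_eq_filter phrase_list []
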